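-- pv_equiv track=rewrite | github.com/Shih-Wei-Lin/Server-Monitor-System | lib/ui/app.py | generate_lights_html
-- ===== SOURCE A (Python) =====
-- def generate_lights_html(num_active_users: int, max_lights: int = 4) -> str:
--     """
--     Generate HTML dots for user activity indicators.
--
--     Parameters:
--         num_active_users (int): Number of active users.
--         max_lights (int): Maximum lights to display.
--     Returns:
--         str: HTML string with colored dots.
--     Raises:
--         None
--     """
--     light_colors = ["#28a745", "#ffc107", "#fd7e14", "#dc3545"]
--     lights = []
--     for i in range(max_lights):
--         light_color = (
--             light_colors[min(num_active_users, max_lights) - 1]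
--             if i < num_active_users
--             else "#6c757d"
--         )
--         lights.append(
--             "<div style='width: 0.6em; height: 0.6em; border-radius: 50%; "
--             "margin-right: 0.3em; background-color: "
--             f"{light_color};'></div>"
--         )
--     return "".join(lights)
-- ===== SOURCE B (Python) =====
-- def generate_lights_html(num_active_users: int, max_lights: int = 4) -> str:
--     light_colors = ["#28a745", "#ffc107", "#fd7e14", "#dc3545"]
--     dot = ("<div style='width: 0.6em; height: 0.6em; border-radius: 50%; "
--            "margin-right: 0.3em; background-color: {};'></div>")
--     active = max(0, min(num_active_users, max_lights))
--     parts = ""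
--     if active:
--         parts = dot.format(light_colors[min(num_active_users, max_lights) - 1]) * active
--     return parts + dot.format("#6c757d") * (max_lights - active)
-- ===== Notes on version B (the rewrite author's own statement) =====
-- stated objective: simpler
-- what changed: Replaces the per-index loop with a branch inside by a count-and-repeat decomposition: compute the clamped active count once, emit the active dot repeated `active` times followed by the gray dot repeated `max_lights - active` times.
import Mathlib
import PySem

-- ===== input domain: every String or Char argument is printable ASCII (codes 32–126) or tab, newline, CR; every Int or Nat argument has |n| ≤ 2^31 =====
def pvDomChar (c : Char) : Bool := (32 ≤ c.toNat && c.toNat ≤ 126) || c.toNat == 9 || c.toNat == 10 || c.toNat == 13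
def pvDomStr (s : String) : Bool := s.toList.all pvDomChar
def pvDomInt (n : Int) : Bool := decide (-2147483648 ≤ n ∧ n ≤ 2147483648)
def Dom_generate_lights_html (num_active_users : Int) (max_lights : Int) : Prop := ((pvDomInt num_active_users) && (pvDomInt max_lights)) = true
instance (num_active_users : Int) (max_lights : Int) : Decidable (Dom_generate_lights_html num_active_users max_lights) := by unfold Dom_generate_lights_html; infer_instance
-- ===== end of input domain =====

-- B replaces A's per-index loop (branching on `i < num_active_users` at every index) by a
-- count-and-repeat decomposition: `active` copies of the colored dot followed by
-- `max_lights - active` copies of the gray dot (objective: simpler). Same return value on Pre_.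

-- ===== PORT A =====
-- A's loop body: "<lit1>" "<lit2>" f"{light_color};'></div>" — one prefix literal, the color, a suffix.
def generate_lights_html (num_active_users : Int) (max_lights : Int) : String :=
  let lightColors : List String := ["#28a745", "#ffc107", "#fd7e14", "#dc3545"]
  let lights : List String :=
    (PySem.List.pyRange 0 max_lights 1).foldl
      (fun acc i =>
        let lightColor : String :=
          if i < num_active_users then
            PySem.List.pyGetD lightColors (min num_active_users max_lights - 1) ""
          else "#6c757d"
        acc ++ [PySem.Str.join ""
          ["<div style='width: 0.6em; height: 0.6em; border-radius: 50%; margin-right: 0.3em; background-color: ",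
           lightColor, ";'></div>"]])
      []
  PySem.Str.join "" lights

-- ===== PORT B =====
-- Source B's `dot.format(c)`: the template split at its single "{}" placeholder, concatenated around c.
def pvDotFmt (c : String) : String :=
  PySem.Str.join ""
    ["<div style='width: 0.6em; height: 0.6em; border-radius: 50%; margin-right: 0.3em; background-color: ",
     c, ";'></div>"]

-- Python `s * k` on a string (empty for k ≤ 0).
def pvStrMul (s : String) (k : Int) : String := PySem.Str.join "" (List.replicate k.toNat s)

def generate_lights_html_alt (num_active_users : Int) (max_lights : Int) : String :=
  let lightColors : List String := ["#28a745", "#ffc107", "#fd7e14", "#dc3545"]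
  let active : Int := max 0 (min num_active_users max_lights)
  let parts : String :=
    if active ≠ 0 then
      pvStrMul (pvDotFmt (PySem.List.pyGetD lightColors (min num_active_users max_lights - 1) "")) active
    else ""
  PySem.Str.join "" [parts, pvStrMul (pvDotFmt "#6c757d") (max_lights - active)]

-- ===== PRECONDITION & SPEC =====
-- Pre_ excludes exactly the inputs where Python A raises IndexError (so does Python B):
-- with num_active_users ≥ 5 and max_lights ≥ 5 the color index min(...)-1 ≥ 4 is past the
-- 4-element color list and is reached by the first active dot.
def Pre_generate_lights_html (num_active_users : Int) (max_lights : Int) : Prop :=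
  ¬ (5 ≤ num_active_users ∧ 5 ≤ max_lights)
instance (num_active_users : Int) (max_lights : Int) : Decidable (Pre_generate_lights_html num_active_users max_lights) := by unfold Pre_generate_lights_html; infer_instance

def pvWitness_generate_lights_html : Int × Int := (2, 4)

def Spec_generate_lights_html (num_active_users : Int) (max_lights : Int) (out : String) : Prop := out = generate_lights_html_alt num_active_users max_lights
instance (num_active_users : Int) (max_lights : Int) (out : String) : Decidable (Spec_generate_lights_html num_active_users max_lights out) := by unfold Spec_generate_lights_html; infer_instance

-- ===== CLAIM (what is proved, stated in full; the proofs are below) =====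
def Claim_equal_generate_lights_html : Prop := ∀ (num_active_users : Int) (max_lights : Int), Dom_generate_lights_html num_active_users max_lights → Pre_generate_lights_html num_active_users max_lights → Spec_generate_lights_html num_active_users max_lights (generate_lights_html num_active_users max_lights)

-- ===== LEMMAS AND PROOFS =====

-- Chars.join with an empty separator is flatten.
theorem pv_join_nil_flatten (l : List (List Char)) : PySem.Chars.join [] l = l.flatten := by
  unfold PySem.Chars.join List.intercalate
  induction l with
  | nil => rfl
  | cons x xs ih =>
    cases xs with
    | nil => simp
    | cons y ys => simp_all [List.intersperse]

-- A's range loop, as a map over the index range, is a run of `on` dots then a run of `off` dots.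
theorem pv_range_map_split (k : Nat) (t : Int) {alpha : Type} (onD offD : alpha) :
    (List.range k).map (fun (j : Nat) => if (j : Int) < t then onD else offD) =
      List.replicate (min t (k : Int)).toNat onD ++
        List.replicate (k - (min t (k : Int)).toNat) offD := by
  induction k with
  | zero => simp
  | succ k ih =>
    rw [List.range_succ, List.map_append, ih]
    by_cases h : (k : Int) < t
    · have hmin : (min t ((k : Int) + 1)).toNat = k + 1 := by omega
      have hmin' : (min t (k : Int)).toNat = k := by omega
      push_cast
      rw [hmin, hmin', List.map_cons, List.map_nil, if_pos h]
      simp [List.replicate_succ']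
    · have hmin : (min t ((k : Int) + 1)).toNat = (min t (k : Int)).toNat := by omega
      have hle : (min t (k : Int)).toNat ≤ k := by omega
      push_cast
      rw [hmin, List.map_cons, List.map_nil, if_neg h]
      have hsub : k + 1 - (min t (k : Int)).toNat = (k - (min t (k : Int)).toNat) + 1 := by omega
      rw [hsub, List.replicate_succ']
      simp [List.append_assoc]

theorem pv_toList_strMul (s : String) (k : Int) :
    (pvStrMul s k).toList = (List.replicate k.toNat s.toList).flatten := by
  have hsep : ("" : String).toList = ([] : List Char) := rfl
  simp [pvStrMul, PySem.Str.toList_join, hsep, pv_join_nil_flatten, List.map_replicate]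

-- ===== VERDICT (by name: the statement is the Claim_ definition above) =====
theorem generate_lights_html_spec : Claim_equal_generate_lights_html := by
  intro n m _ _
  unfold Spec_generate_lights_html generate_lights_html generate_lights_html_alt
  rw [← String.toList_inj]
  simp only [PySem.List.foldl_append_singleton_eq_map, List.nil_append,
    PySem.List.pyRange_one, Int.sub_zero, Int.zero_add]
  have hsep : ("" : String).toList = ([] : List Char) := rfl
  -- the two dot strings
  set colors : List String := ["#28a745", "#ffc107", "#fd7e14", "#dc3545"] with hcolors
  set onD : String := PySem.Str.join ""
    ["<div style='width: 0.6em; height: 0.6em; border-radius: 50%; margin-right: 0.3em; background-color: ",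
     PySem.List.pyGetD colors (min n m - 1) "", ";'></div>"] with honD
  set offD : String := PySem.Str.join ""
    ["<div style='width: 0.6em; height: 0.6em; border-radius: 50%; margin-right: 0.3em; background-color: ",
     "#6c757d", ";'></div>"] with hoffD
  have honB : pvDotFmt (PySem.List.pyGetD colors (min n m - 1) "") = onD := rfl
  have hoffB : pvDotFmt "#6c757d" = offD := rfl
  rw [honB, hoffB]
  set a : Nat := (min n (m.toNat : Int)).toNat with ha
  set b : Nat := m.toNat - a with hb
  -- A's list of dot strings is a run of onD then a run of offD
  have hL : (List.map (fun x =>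
        PySem.Str.join ""
          ["<div style='width: 0.6em; height: 0.6em; border-radius: 50%; margin-right: 0.3em; background-color: ",
           if x < n then PySem.List.pyGetD colors (min n m - 1) "" else "#6c757d", ";'></div>"]
        ) (List.map (fun (k : Nat) => (k : Int)) (List.range m.toNat))) =
      List.replicate a onD ++ List.replicate b offD := by
    rw [List.map_map]
    have hfun : ((fun x =>
        PySem.Str.join ""
          ["<div style='width: 0.6em; height: 0.6em; border-radius: 50%; margin-right: 0.3em; background-color: ",
           if x < n then PySem.List.pyGetD colors (min n m - 1) "" else "#6c757d", ";'></div>"]) ∘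
         (fun (k : Nat) => (k : Int))) =
        fun (j : Nat) => if (j : Int) < n then onD else offD := by
      funext j
      by_cases h : (j : Int) < n
      · simp [Function.comp, h, honD]
      · simp [Function.comp, h, hoffD]
    rw [hfun, pv_range_map_split m.toNat n onD offD, ← ha, ← hb]
  rw [hL]
  rw [PySem.Str.toList_join, PySem.Str.toList_join, hsep, pv_join_nil_flatten, pv_join_nil_flatten]
  simp only [List.map_append, List.map_replicate, List.flatten_append, List.map_cons,
    List.map_nil, List.flatten_cons, List.flatten_nil, List.append_nil, pv_toList_strMul]
  by_cases hact : max 0 (min n m) ≠ 0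
  · rw [if_pos hact]
    have h1 : (max 0 (min n m)).toNat = a := by omega
    have h2 : (m - max 0 (min n m)).toNat = b := by omega
    rw [pv_toList_strMul, h1, h2]
  · rw [if_neg hact]
    have h1 : a = 0 := by omega
    have h2 : (m - max 0 (min n m)).toNat = b := by omega
    have h3 : b = m.toNat := by omega
    rw [h1, h2]
    simp
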